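-- pv_equiv track=rewrite | github.com/joshuashevchuk1/LeetHackerQuestionsStudy | leet/leet2268.py | minimumKeypresses
-- ===== SOURCE A (Python) =====
-- from collections import defaultdict, Counter
--
-- def minimumKeypresses(s: str) -> int:
--     def get_sorted_string(s):
--         # Sort characters by frequency (descending), then alphabetically
--         freq = Counter(s)
--         sorted_string = sorted(freq.keys(), key=lambda x: (-freq[x], x))
--         return ''.join(sorted_string)
--
--     def getMultipliers(key_grid):
--         multipliers = defaultdict(list)
--         total_length = len(key_grid)
--
--         if total_length > 0:
--             multipliers[1] = key_grid[:9]  # First 9 characters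
--         if total_length > 9:
--             multipliers[2] = key_grid[9:18]  # Next 9 characters
--         if total_length > 18:
--             multipliers[3] = key_grid[18:]  # Remaining characters
--
--         return multipliers
--
--     sorted_string = get_sorted_string(s)
--     weights = getMultipliers(sorted_string)
--
--     total_presses = 0
--
--     for char in s:
--         if char in weights[1]:
--             total_presses += 1
--         elif char in weights[2]:
--             total_presses += 2
--         elif char in weights[3]:
--             total_presses += 3
--
--     return total_presses
-- ===== SOURCE B (Python) =====
-- from collections import Counter
--
-- def minimumKeypresses(s: str) -> int:
--     # Rank the distinct characters by frequency: only the sorted frequency VALUES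
--     # matter for the total, not which character sits on which key.  Rank i costs
--     # min(i // 9 + 1, 3) presses (the third tier takes all remaining characters).
--     counts = sorted(Counter(s).values(), reverse=True)
--     return sum(c * min(i // 9 + 1, 3) for i, c in enumerate(counts))
-- ===== Notes on version B (the rewrite author's own statement) =====
-- stated objective: simpler
-- what changed: B sorts the frequency values descending and sums count*min(rank//9+1,3) in one ranked pass, replacing A's sorted-string construction, tier-slice dictionary and per-character membership tests over the whole input.
import Mathlib
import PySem

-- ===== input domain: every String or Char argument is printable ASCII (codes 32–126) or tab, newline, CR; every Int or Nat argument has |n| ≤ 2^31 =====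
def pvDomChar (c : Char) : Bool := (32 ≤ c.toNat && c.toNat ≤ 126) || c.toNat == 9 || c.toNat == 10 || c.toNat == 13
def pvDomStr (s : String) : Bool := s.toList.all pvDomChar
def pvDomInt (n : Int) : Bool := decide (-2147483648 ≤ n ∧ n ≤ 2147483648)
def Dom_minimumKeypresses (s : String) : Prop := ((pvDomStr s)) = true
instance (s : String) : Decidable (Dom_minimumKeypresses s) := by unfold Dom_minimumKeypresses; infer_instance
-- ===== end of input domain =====

-- B replaces A's sorted-string + tier-slice dict + per-character membership loop by one
-- ranked pass over the descending-sorted frequency values (simpler; a timing run measured it faster).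


-- ===== PORT A =====
-- get_sorted_string: Counter, then sorted(keys, key=lambda x: (-freq[x], x)).
-- ''.join of single characters is the character list itself, so we keep List Char.
def pvGetSortedString (cs : List Char) : List Char :=
  let freq := PySem.Dict.counter cs
  PySem.List.sorted2 freq.keys (fun x => -(freq.getD x 0)) (fun x => x) false

-- getMultipliers: defaultdict(list) with the three conditional slice assignments.
def pvGetMultipliers (keyGrid : List Char) : PySem.Dict Int (List Char) :=
  let m0 : PySem.Dict Int (List Char) := PySem.Dict.empty
  let m1 := if PySem.List.len keyGrid > 0 then
      m0.insert 1 (PySem.List.slice keyGrid none (some 9)) else m0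
  let m2 := if PySem.List.len keyGrid > 9 then
      m1.insert 2 (PySem.List.slice keyGrid (some 9) (some 18)) else m1
  if PySem.List.len keyGrid > 18 then
      m2.insert 3 (PySem.List.slice keyGrid (some 18) none) else m2

def minimumKeypresses (s : String) : Int :=
  let sortedString := pvGetSortedString s.toList
  let weights := pvGetMultipliers sortedString
  s.toList.foldl (fun acc c =>
    if c ∈ weights.getD 1 [] then acc + 1
    else if c ∈ weights.getD 2 [] then acc + 2
    else if c ∈ weights.getD 3 [] then acc + 3
    else acc) 0

-- ===== PORT B =====
def minimumKeypresses_alt (s : String) : Int :=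
  let counts := PySem.List.sorted (PySem.Dict.counter s.toList).values (fun v => v) true
  ((PySem.List.enumerate counts).map
    (fun p => p.2 * min (PySem.Int.floordiv p.1 9 + 1) 3)).sum

-- ===== PRECONDITION & SPEC =====
def Spec_minimumKeypresses (s : String) (out : Int) : Prop := out = minimumKeypresses_alt s
instance (s : String) (out : Int) : Decidable (Spec_minimumKeypresses s out) := by unfold Spec_minimumKeypresses; infer_instance

-- ===== CLAIM (what is proved, stated in full; the proofs are below) =====
def Claim_equal_minimumKeypresses : Prop := ∀ (s : String), Dom_minimumKeypresses s → Spec_minimumKeypresses s (minimumKeypresses s)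

-- ===== LEMMAS AND PROOFS =====

theorem pv_slices (ss : List Char) :
    PySem.List.slice ss none (some 9) = ss.take 9 ∧
    PySem.List.slice ss (some 9) (some 18) = (ss.drop 9).take 9 ∧
    PySem.List.slice ss (some 18) none = ss.drop 18 := by
  refine ⟨?_, ?_, ?_⟩
  · rw [PySem.List.slice_to ss (by norm_num)]; norm_num [Int.toNat]
  · rw [PySem.List.slice_toNat ss (by norm_num) (by norm_num)]; norm_num [Int.toNat]
  · rw [PySem.List.slice_from ss (by norm_num)]; norm_num [Int.toNat]

theorem pv_w1 (ss : List Char) : (pvGetMultipliers ss).getD 1 [] = ss.take 9 := by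
  unfold pvGetMultipliers
  simp only [PySem.List.len_eq]
  obtain ⟨e1, e2, e3⟩ := pv_slices ss
  split_ifs with h1 h2 h3 <;>
    simp_all [PySem.Dict.getD_insert_of_ne, PySem.Dict.getD_insert_self, PySem.Dict.getD_empty]

theorem pv_w2 (ss : List Char) : (pvGetMultipliers ss).getD 2 [] = (ss.drop 9).take 9 := by
  unfold pvGetMultipliers
  simp only [PySem.List.len_eq]
  obtain ⟨e1, e2, e3⟩ := pv_slices ss
  split_ifs with h1 h2 h3 <;>
    simp_all [PySem.Dict.getD_insert_of_ne, PySem.Dict.getD_insert_self, PySem.Dict.getD_empty]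

theorem pv_w3 (ss : List Char) : (pvGetMultipliers ss).getD 3 [] = ss.drop 18 := by
  unfold pvGetMultipliers
  simp only [PySem.List.len_eq]
  obtain ⟨e1, e2, e3⟩ := pv_slices ss
  split_ifs with h1 h2 h3 <;>
    simp_all [PySem.Dict.getD_insert_of_ne, PySem.Dict.getD_insert_self, PySem.Dict.getD_empty]


theorem pv_tier1 (i : Int) (h0 : 0 ≤ i) (h9 : i < 9) :
    min (PySem.Int.floordiv i 9 + 1) 3 = 1 := by
  have h : PySem.Int.floordiv i 9 = 0 := by
    rw [PySem.Int.floordiv_eq_iff_of_pos (by norm_num)]; omega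
  rw [h]; norm_num

theorem pv_tier2 (i : Int) (h0 : 9 ≤ i) (h9 : i < 18) :
    min (PySem.Int.floordiv i 9 + 1) 3 = 2 := by
  have h : PySem.Int.floordiv i 9 = 1 := by
    rw [PySem.Int.floordiv_eq_iff_of_pos (by norm_num)]; omega
  rw [h]; norm_num

theorem pv_tier3 (i : Int) (h0 : 18 ≤ i) :
    min (PySem.Int.floordiv i 9 + 1) 3 = 3 := by
  have h : (2:Int) ≤ PySem.Int.floordiv i 9 := by
    rw [PySem.Int.le_floordiv_iff_mul_le (by norm_num)]; omega
  exact min_eq_right (by omega)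

theorem pv_enum_tier (m : Int) :
    ∀ (l : List Int) (st : Int),
      (∀ i : Int, st ≤ i → i < st + l.length → min (PySem.Int.floordiv i 9 + 1) 3 = m) →
      ((PySem.List.enumerate l st).map
        (fun p => p.2 * min (PySem.Int.floordiv p.1 9 + 1) 3)).sum = m * l.sum := by
  intro l
  induction l with
  | nil => intro st h; simp [PySem.List.enumerate_nil]
  | cons v l ih =>
    intro st h
    rw [PySem.List.enumerate_cons]
    simp only [List.map_cons, List.sum_cons, List.sum_cons]
    rw [ih (st + 1) (fun i h1 h2 => h i (by omega) (by simp only [List.length_cons]; push_cast; omega)),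
        h st (le_refl st) (by simp only [List.length_cons]; push_cast; omega)]
    ring

theorem pv_sum_single (g : Char → Int) (c : Char) :
    ∀ ss : List Char, ss.Nodup → c ∈ ss →
      (ss.map (fun k => if k = c then g k else 0)).sum = g c := by
  intro ss
  induction ss with
  | nil => intro _ h; cases h
  | cons y ys ih =>
    intro hnd hmem
    rcases List.mem_cons.1 hmem with hcy | hm
    · subst hcy
      have hy : c ∉ ys := (List.nodup_cons.1 hnd).1
      simp only [List.map_cons, List.sum_cons]
      have : (ys.map (fun k => if k = c then g k else 0)).sum = 0 := by
        apply List.sum_eq_zero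
        intro x hx
        rcases List.mem_map.1 hx with ⟨k, hk, rfl⟩
        have : k ≠ c := fun h => hy (h ▸ hk)
        simp [this]
      simp [this]
    · have hy : y ∉ ys := (List.nodup_cons.1 hnd).1
      have hys : ys.Nodup := (List.nodup_cons.1 hnd).2
      have hyne : y ≠ c := fun h => hy (h ▸ hm)
      simp only [List.map_cons, List.sum_cons, if_neg hyne, zero_add]
      exact ih hys hm

theorem pv_sum_count (ss : List Char) (hnd : ss.Nodup) (g : Char → Int) :
    ∀ cs : List Char, (∀ c ∈ cs, c ∈ ss) →
      (cs.map g).sum = (ss.map (fun k => (cs.count k : Int) * g k)).sum := by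
  intro cs
  induction cs with
  | nil =>
    intro _
    simp only [List.map_nil, List.sum_nil]
    symm; apply List.sum_eq_zero
    intro x hx
    rcases List.mem_map.1 hx with ⟨k, _, rfl⟩
    simp
  | cons c cs ih =>
    intro hcov
    have hc : c ∈ ss := hcov c (List.mem_cons_self ..)
    have hcov' : ∀ x ∈ cs, x ∈ ss := fun x hx => hcov x (List.mem_cons_of_mem _ hx)
    simp only [List.map_cons, List.sum_cons]
    have hterm : ∀ k : Char, ((c :: cs).count k : Int) * g k
        = (cs.count k : Int) * g k + (if k = c then g k else 0) := by
      intro k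
      rw [List.count_cons]
      by_cases h : k = c
      · subst h; simp; ring
      · have : ¬ (c == k) = true := by simpa [beq_iff_eq] using fun h2 => h h2.symm
        simp [this, h]
    calc g c + (cs.map g).sum
        = (ss.map (fun k => (cs.count k : Int) * g k)).sum
          + (ss.map (fun k => if k = c then g k else 0)).sum := by
          rw [ih hcov', pv_sum_single g c ss hnd hc]; ring
      _ = (ss.map (fun k => ((c :: cs).count k : Int) * g k)).sum := by
          rw [← PySem.List.sum_map_add_int]
          apply congrArg
          apply List.map_congr_left
          intro k _
          rw [hterm k]

theorem pv_insertBy_pairwise {α : Type} (R : α → α → Prop) (before : α → α → Bool)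
    (hT : ∀ a b, before a b = true → R a b) (hF : ∀ a b, before a b = false → R b a)
    (htr : ∀ {a b c : α}, R a b → R b c → R a c) (x : α) (ys : List α) (h : ys.Pairwise R) :
    (PySem.List.insertBy before x ys).Pairwise R := by
  induction ys with
  | nil => simp [PySem.List.insertBy]
  | cons y ys ih =>
    rcases List.pairwise_cons.1 h with ⟨hy, hys⟩
    by_cases hb : before x y = true
    · simp only [PySem.List.insertBy, hb, if_true]
      refine List.pairwise_cons.2 ⟨?_, h⟩
      intro z hz
      rcases List.mem_cons.1 hz with rfl | hz
      · exact hT _ _ hb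
      · exact htr (hT _ _ hb) (hy z hz)
    · simp only [PySem.List.insertBy, hb]
      refine List.pairwise_cons.2 ⟨?_, ih hys⟩
      intro z hz
      rcases (PySem.List.insertBy_mem_iff before x z ys).1 hz with rfl | hz
      · exact hF _ _ (Bool.eq_false_iff.2 hb)
      · exact hy z hz

theorem pv_foldl_insertBy_pairwise {α : Type} (R : α → α → Prop) (before : α → α → Bool)
    (hT : ∀ a b, before a b = true → R a b) (hF : ∀ a b, before a b = false → R b a)
    (htr : ∀ {a b c : α}, R a b → R b c → R a c) (xs : List α) :
    ∀ acc : List α, acc.Pairwise R →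
      (xs.foldl (fun acc x => PySem.List.insertBy before x acc) acc).Pairwise R := by
  induction xs with
  | nil => intro acc hacc; simpa using hacc
  | cons x xs ih =>
    intro acc hacc
    simpa using ih _ (pv_insertBy_pairwise R before hT hF htr x acc hacc)

theorem pv_sorted2_pairwise_key1 {α κ₁ κ₂ : Type} [LinearOrder κ₁] [LinearOrder κ₂]
    (xs : List α) (k1 : α → κ₁) (k2 : α → κ₂) :
    (PySem.List.sorted2 xs k1 k2 false).Pairwise (fun a b => k1 a ≤ k1 b) := by
  unfold PySem.List.sorted2
  simp only [if_neg (by decide : ¬ (false = true))]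
  apply pv_foldl_insertBy_pairwise
  · intro a b hb
    simp only [Bool.or_eq_true, Bool.and_eq_true, Bool.not_eq_true', decide_eq_true_eq,
      decide_eq_false_iff_not] at hb
    rcases hb with h | ⟨h, _⟩
    · exact le_of_lt h
    · exact le_of_not_gt h
  · intro a b hb
    simp only [Bool.or_eq_false_iff, Bool.and_eq_false_iff, Bool.not_eq_false', decide_eq_true_eq,
      decide_eq_false_iff_not] at hb
    exact le_of_not_gt hb.1
  · exact fun hab hbc => le_trans hab hbc
  · exact List.Pairwise.nil

theorem pv_ss_pairwise (cs : List Char) :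
    (pvGetSortedString cs).Pairwise
      (fun a b => ((cs.count b : Int)) ≤ (cs.count a : Int)) := by
  unfold pvGetSortedString
  have h := pv_sorted2_pairwise_key1 (PySem.Dict.counter cs).keys
      (fun x : Char => -((PySem.Dict.counter cs).getD x 0)) (fun x : Char => x)
  refine h.imp ?_
  intro a b hab
  have ha := PySem.Dict.getD_counter cs a
  have hb := PySem.Dict.getD_counter cs b
  simp only at hab
  omega

theorem pv_ss_nodup (cs : List Char) : (pvGetSortedString cs).Nodup := by
  unfold pvGetSortedString
  have hp := PySem.List.sorted2_perm (PySem.Dict.counter cs).keys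
      (fun x : Char => -((PySem.Dict.counter cs).getD x 0)) (fun x : Char => x) false
  exact hp.nodup_iff.2 (PySem.Dict.nodup_keys_counter cs)

theorem pv_mem_ss (cs : List Char) (c : Char) (h : c ∈ cs) : c ∈ pvGetSortedString cs := by
  unfold pvGetSortedString
  have hp := PySem.List.sorted2_perm (PySem.Dict.counter cs).keys
      (fun x : Char => -((PySem.Dict.counter cs).getD x 0)) (fun x : Char => x) false
  rw [hp.mem_iff, PySem.Dict.keys_counter]
  exact (PySem.Set.mem_ofList cs c).2 h

theorem pv_counts_eq (cs : List Char) :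
    PySem.List.sorted (PySem.Dict.counter cs).values (fun v => v) true
      = (pvGetSortedString cs).map (fun k => (cs.count k : Int)) := by
  have hperm : (PySem.List.sorted (PySem.Dict.counter cs).values (fun v => v) true).Perm
      ((pvGetSortedString cs).map (fun k => (cs.count k : Int))) := by
    have h1 := PySem.List.sorted_perm (PySem.Dict.counter cs).values (fun v : Int => v) true
    have h2 : (PySem.Dict.counter cs).values
        = (PySem.Dict.counter cs).keys.map (fun k => (cs.count k : Int)) := by
      rw [PySem.Dict.values_eq_map_keys (PySem.Dict.counter cs) (PySem.Dict.nodup_keys_counter cs) 0]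
      apply List.map_congr_left
      intro k _
      exact PySem.Dict.getD_counter cs k
    have h3 : (pvGetSortedString cs).Perm (PySem.Dict.counter cs).keys := by
      unfold pvGetSortedString
      exact PySem.List.sorted2_perm ..
    exact (h1.trans (h2 ▸ List.Perm.refl _)).trans (h3.map _).symm
  have hs1 : (PySem.List.sorted (PySem.Dict.counter cs).values (fun v : Int => v) true).Pairwise
      (fun a b : Int => b ≤ a) := PySem.List.sorted_pairwise_rev _ _
  have hs2 : ((pvGetSortedString cs).map (fun k => (cs.count k : Int))).Pairwise
      (fun a b : Int => b ≤ a) := by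
    rw [List.pairwise_map]
    exact pv_ss_pairwise cs
  exact List.Perm.eq_of_pairwise (fun a b _ _ h1 h2 => le_antisymm h2 h1) hs1 hs2 hperm

theorem pv_final (cnt : Char → Int) (t1 t2 t3 : List Char)
    (hnd : (t1 ++ (t2 ++ t3)).Nodup)
    (h1 : t1.length ≤ 9) (h2 : t2.length ≤ 9)
    (h19 : t2 ≠ [] → t1.length = 9) (h29 : t3 ≠ [] → t1.length = 9 ∧ t2.length = 9) :
    ((t1 ++ (t2 ++ t3)).map (fun k => cnt k *
        (if k ∈ t1 then (1:Int) else if k ∈ t2 then 2 else if k ∈ t3 then 3 else 0))).sum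
    = ((PySem.List.enumerate ((t1 ++ (t2 ++ t3)).map cnt)).map
        (fun p => p.2 * min (PySem.Int.floordiv p.1 9 + 1) 3)).sum := by
  rcases List.nodup_append.1 hnd with ⟨hnd1, hnd23, hdisj1⟩
  rcases List.nodup_append.1 hnd23 with ⟨hnd2, hnd3, hdisj2⟩
  -- LHS: one constant multiplier per block
  have e1 : t1.map (fun k => cnt k *
      (if k ∈ t1 then (1:Int) else if k ∈ t2 then 2 else if k ∈ t3 then 3 else 0))
      = t1.map (fun k => cnt k * 1) := by
    apply List.map_congr_left; intro k hk
    rw [if_pos hk]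
  have e2 : t2.map (fun k => cnt k *
      (if k ∈ t1 then (1:Int) else if k ∈ t2 then 2 else if k ∈ t3 then 3 else 0))
      = t2.map (fun k => cnt k * 2) := by
    apply List.map_congr_left; intro k hk
    have hn1 : k ∉ t1 := fun hk1 => hdisj1 k hk1 k (List.mem_append_left _ hk) rfl
    rw [if_neg hn1, if_pos hk]
  have e3 : t3.map (fun k => cnt k *
      (if k ∈ t1 then (1:Int) else if k ∈ t2 then 2 else if k ∈ t3 then 3 else 0))
      = t3.map (fun k => cnt k * 3) := by
    apply List.map_congr_left; intro k hk
    have hn1 : k ∉ t1 := fun hk1 => hdisj1 k hk1 k (List.mem_append_right _ hk) rfl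
    have hn2 : k ∉ t2 := fun hk2 => hdisj2 k hk2 k hk rfl
    rw [if_neg hn1, if_neg hn2, if_pos hk]
  rw [List.map_append, List.map_append, List.sum_append, List.sum_append, e1, e2, e3]
  -- RHS: enumerate over the three blocks
  rw [List.map_append, List.map_append,
      PySem.List.enumerate_append, PySem.List.enumerate_append,
      List.map_append, List.map_append, List.sum_append, List.sum_append]
  rw [pv_enum_tier 1 (t1.map cnt) 0 (by
        intro i hi1 hi2
        simp only [List.length_map] at hi2
        exact pv_tier1 i hi1 (by omega))]
  rw [pv_enum_tier 2 (t2.map cnt) _ (by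
        intro i hi1 hi2
        rcases List.eq_nil_or_concat t2 with ht | ht
        · rw [ht] at hi2; simp at hi1 hi2; omega
        · have h9 : t1.length = 9 := h19 (by rintro rfl; simp at ht)
          simp only [List.length_map, h9] at hi1 hi2
          exact pv_tier2 i (by omega) (by omega))]
  rw [pv_enum_tier 3 (t3.map cnt) _ (by
        intro i hi1 hi2
        rcases List.eq_nil_or_concat t3 with ht | ht
        · rw [ht] at hi2; simp at hi1 hi2; omega
        · obtain ⟨h9, h9'⟩ := h29 (by rintro rfl; simp at ht)
          simp only [List.length_map, h9, h9'] at hi1 hi2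
          exact pv_tier3 i (by omega))]
  rw [List.sum_map_mul_right, List.sum_map_mul_right, List.sum_map_mul_right]
  ring

theorem pv_main (s : String) : minimumKeypresses s = minimumKeypresses_alt s := by
  simp only [minimumKeypresses, minimumKeypresses_alt]
  rw [pv_counts_eq s.toList]
  set cs := s.toList with hcs
  set ss := pvGetSortedString cs with hss
  simp only [pv_w1, pv_w2, pv_w3]
  set t1 := ss.take 9 with ht1
  set t2 := (ss.drop 9).take 9 with ht2
  set t3 := ss.drop 18 with ht3
  have hdecomp : ss = t1 ++ (t2 ++ t3) := by
    rw [ht1, ht2, ht3]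
    conv_lhs => rw [← List.take_append_drop 9 ss]
    congr 1
    conv_lhs => rw [← List.take_append_drop 9 (ss.drop 9)]
    congr 1
    rw [List.drop_drop]
  have hl1 : t1.length = min 9 ss.length := by rw [ht1]; simp
  have hl2 : t2.length = min 9 (ss.length - 9) := by rw [ht2]; simp
  have hl3 : t3.length = ss.length - 18 := by rw [ht3]; simp
  have hbody : ∀ acc : Int, ∀ c ∈ cs,
      (if c ∈ t1 then acc + 1 else if c ∈ t2 then acc + 2 else if c ∈ t3 then acc + 3 else acc)
      = acc + (if c ∈ t1 then (1:Int) else if c ∈ t2 then 2 else if c ∈ t3 then 3 else 0) := by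
    intro acc c _
    by_cases h1 : c ∈ t1
    · simp [h1]
    · by_cases h2 : c ∈ t2
      · simp [h1, h2]
      · by_cases h3 : c ∈ t3 <;> simp [h1, h2, h3]
  have hA : cs.foldl (fun acc c =>
        if c ∈ t1 then acc + 1 else if c ∈ t2 then acc + 2 else if c ∈ t3 then acc + 3 else acc) 0
      = (cs.map (fun c =>
          if c ∈ t1 then (1:Int) else if c ∈ t2 then 2 else if c ∈ t3 then 3 else 0)).sum := by
    rw [PySem.List.foldl_congr_mem cs _
        (fun acc c => acc +
          (if c ∈ t1 then (1:Int) else if c ∈ t2 then 2 else if c ∈ t3 then 3 else 0)) 0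
        hbody, PySem.List.foldl_add, zero_add]
  rw [hA,
    pv_sum_count ss (pv_ss_nodup cs) _ cs (fun c hc => pv_mem_ss cs c hc)]
  rw [hdecomp]
  exact pv_final (fun k => (cs.count k : Int)) t1 t2 t3 (hdecomp ▸ pv_ss_nodup cs)
      (by omega) (by omega)
      (fun h => by
        have : t2.length ≠ 0 := fun h0 => h (List.eq_nil_of_length_eq_zero h0)
        omega)
      (fun h => by
        have : t3.length ≠ 0 := fun h0 => h (List.eq_nil_of_length_eq_zero h0)
        omega)

-- ===== VERDICT (by name: the statement is the Claim_ definition above) =====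
theorem minimumKeypresses_spec : Claim_equal_minimumKeypresses := by
  intro s _
  exact pv_main s
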